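-- pv_equiv track=rewrite | github.com/Geneus003/UpdateVkStatus | Forminate_string.py | do_it
-- ===== SOURCE A (Python) =====
-- def do_it(data):
--     if len(data) == 0:
--         return "Отдыхаю"
--
--     strochka = "Прямо сейчас он "
--
--     for i in range(len(data)):
--         if strochka == "Прямо сейчас он ":
--             strochka += data[i][0].lower()
--             strochka += data[i][1:len(data[i])]
--             continue
--
--         if i == len(data) - 1:
--             strochka += ", и "
--             strochka += data[i][0].lower()
--             strochka += data[i][1:len(data[i])]
--             continue
--
--         strochka += ", "
--         strochka += data[i][0].lower()
--         strochka += data[i][1:len(data[i])]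
--
--     strochka += ". Напишите ему)"
--
--     return strochka
-- ===== SOURCE B (Python) =====
-- def do_it(data):
--     if not data:
--         return "Отдыхаю"
--     t = [s[0].lower() + s[1:] for s in data]
--     if len(t) == 1:
--         body = t[0]
--     else:
--         body = ", ".join(t[:-1]) + ", и " + t[-1]
--     return "Прямо сейчас он " + body + ". Напишите ему)"
-- ===== Notes on version B (the rewrite author's own statement) =====
-- stated objective: simpler
-- what changed: Replaces the sentinel-string-comparison accumulator loop over indices with map-then-join: lowercase each element once, join all but the last with ', ', append ', и ' plus the last; no per-element sentinel comparison or quadratic string concatenation.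
import Mathlib
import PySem

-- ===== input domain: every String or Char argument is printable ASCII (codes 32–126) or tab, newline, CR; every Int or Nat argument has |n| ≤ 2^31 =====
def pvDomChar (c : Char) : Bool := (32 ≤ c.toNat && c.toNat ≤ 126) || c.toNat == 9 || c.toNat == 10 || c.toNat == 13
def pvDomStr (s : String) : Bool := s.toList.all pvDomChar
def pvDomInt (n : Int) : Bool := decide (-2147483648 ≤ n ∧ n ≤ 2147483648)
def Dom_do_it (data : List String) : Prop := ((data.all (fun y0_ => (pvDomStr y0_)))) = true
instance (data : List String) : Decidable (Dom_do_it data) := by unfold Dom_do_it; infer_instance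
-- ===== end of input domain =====

-- B replaces A's sentinel-comparison accumulator loop with map-then-join (objective: simpler).

-- ===== PORT A =====
-- A-side helper: data[i][0].lower() + data[i][1:len(data[i])].
-- On the empty string Python raises IndexError (data[i][0]); those inputs are excluded by
-- Pre_, so the [] branch is never reached under Pre_.
def pvLowA (cs : List Char) : List Char :=
  match cs with
  | [] => []
  | c :: rest => PySem.Chars.lower [c] ++ rest

-- A's loop body (the three branches, in A's order: sentinel test, last-index test, middle)
def pvStepA (data : List String) (strochka : List Char) (i : Int) : List Char :=
  if strochka = "Прямо сейчас он ".toList then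
    strochka ++ pvLowA (PySem.List.pyGetD data i "").toList
  else if i = (data.length : Int) - 1 then
    strochka ++ ", и ".toList ++ pvLowA (PySem.List.pyGetD data i "").toList
  else
    strochka ++ ", ".toList ++ pvLowA (PySem.List.pyGetD data i "").toList

-- literal transliteration of A (accumulator string over List Char)
def do_it (data : List String) : String :=
  if data.length = 0 then "Отдыхаю"
  else
    let res := (PySem.List.pyRange 0 data.length 1).foldl (pvStepA data)
      "Прямо сейчас он ".toList
    String.ofList (res ++ ". Напишите ему)".toList)

-- ===== PORT B =====
-- B-side helper: s[0].lower() + s[1:]  (empty string = IndexError in Python, excluded by Pre_)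
def pvLowB (cs : List Char) : List Char :=
  match cs with
  | [] => []
  | c :: rest => PySem.Chars.lower [c] ++ rest

-- literal transliteration of B: map, then join all-but-last with ", ", then ", и " + last
def do_it_alt (data : List String) : String :=
  if data.isEmpty then "Отдыхаю"
  else
    let t := data.map (fun s => pvLowB s.toList)
    let body := if t.length = 1 then t.headD []
      else PySem.Chars.join ", ".toList t.dropLast ++ ", и ".toList ++ t.getLastD []
    String.ofList ("Прямо сейчас он ".toList ++ body ++ ". Напишите ему)".toList)

-- ===== PRECONDITION & SPEC =====
-- Pre_ excludes lists containing an empty string: there Python A raises IndexError on data[i][0].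
def Pre_do_it (data : List String) : Prop := ∀ s ∈ data, s ≠ ""
instance (data : List String) : Decidable (Pre_do_it data) := by unfold Pre_do_it; infer_instance
def pvWitness_do_it : List String := ["Run", "Walk"]

def Spec_do_it (data : List String) (out : String) : Prop := out = do_it_alt data
instance (data : List String) (out : String) : Decidable (Spec_do_it data out) := by unfold Spec_do_it; infer_instance

-- ===== CLAIM (what is proved, stated in full; the proofs are below) =====
def Claim_equal_do_it : Prop := ∀ (data : List String), Dom_do_it data → Pre_do_it data → Spec_do_it data (do_it data)

-- ===== LEMMAS AND PROOFS =====

-- the common "middle" of the sentence after the first element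
def pvMidA : List (List Char) → List Char
  | [] => []
  | [t] => ", и ".toList ++ t
  | t :: u :: us => ", ".toList ++ t ++ pvMidA (u :: us)

lemma pvMidA_cons (t : List Char) (ts : List (List Char)) (h : ts ≠ []) :
    pvMidA (t :: ts) = ", ".toList ++ t ++ pvMidA ts := by
  cases ts with
  | nil => exact absurd rfl h
  | cons u us => rfl

lemma pvLowA_length_pos (cs : List Char) (h : cs ≠ []) : 0 < (pvLowA cs).length := by
  cases cs with
  | nil => exact absurd rfl h
  | cons c r => simp [pvLowA, PySem.Chars.lower]

-- A's loop from index k onward, once the accumulator is longer than the sentinel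
lemma pvFoldA (data : List String) :
    ∀ (n k : Nat) (acc : List Char), data.length - k = n → k ≤ data.length →
    ("Прямо сейчас он ".toList).length < acc.length →
    (PySem.List.pyRange (k : Int) (data.length : Int) 1).foldl (pvStepA data) acc
    = acc ++ pvMidA ((data.drop k).map (fun s => pvLowA s.toList)) := by
  intro n
  induction n with
  | zero =>
    intro k acc hn hk _
    have hk' : k = data.length := by omega
    subst hk'
    rw [PySem.List.pyRange_one_eq_nil (by omega)]
    simp [pvMidA]
  | succ m ih =>
    intro k acc hn hk hacc
    have hklt : k < data.length := by omega
    rw [PySem.List.pyRange_one_cons (by exact_mod_cast hklt)]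
    rw [List.foldl_cons]
    have hne : acc ≠ "Прямо сейчас он ".toList := by
      intro e; rw [e] at hacc; omega
    have hget : (PySem.List.pyGetD data (k : Int) "") = data.getD k "" := by
      simp [PySem.List.pyGetD_natCast]
    have hdrop : data.drop k = data[k] :: data.drop (k + 1) :=
      List.drop_eq_getElem_cons hklt
    have hkel : data.getD k "" = data[k] := by
      simp [List.getD_eq_getElem?_getD, hklt]
    by_cases hlast : (k : Int) = (data.length : Int) - 1
    · have hk1 : k + 1 = data.length := by omega
      rw [show pvStepA data acc (k : Int)
            = acc ++ ", и ".toList ++ pvLowA data[k].toList by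
          unfold pvStepA
          rw [if_neg hne, if_pos hlast, hget, hkel]]
      rw [PySem.List.pyRange_one_eq_nil (by omega), List.foldl_nil]
      have hnil : data.drop (k + 1) = [] := by rw [hk1]; simp
      rw [hdrop, hnil]
      simp [pvMidA]
    · have hk1 : k + 1 < data.length := by
        rcases Nat.lt_or_ge (k + 1) data.length with h | h
        · exact h
        · exact absurd (by omega : (k : Int) = (data.length : Int) - 1) hlast
      rw [show pvStepA data acc (k : Int)
            = acc ++ ", ".toList ++ pvLowA data[k].toList by
          unfold pvStepA
          rw [if_neg hne, if_neg hlast, hget, hkel]]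
      have hacc' : ("Прямо сейчас он ".toList).length
          < (acc ++ ", ".toList ++ pvLowA data[k].toList).length := by
        simp only [List.length_append]; omega
      rw [show ((k : Int) + 1) = ((k + 1 : Nat) : Int) by push_cast; ring]
      rw [ih (k + 1) _ (by omega) (by omega) hacc']
      have hdrop1 : data.drop (k + 1) ≠ [] := by
        intro e
        have := congrArg List.length e
        simp at this; omega
      rw [hdrop, List.map_cons, pvMidA_cons _ _ (by simpa using hdrop1)]
      simp [List.append_assoc]

-- B's join-based body equals the same "middle"
lemma pvJoinB (t0 : List Char) (ts : List (List Char)) (h : ts ≠ []) :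
    PySem.Chars.join ", ".toList (t0 :: ts).dropLast ++ ", и ".toList ++ (t0 :: ts).getLastD []
    = t0 ++ pvMidA ts := by
  induction ts generalizing t0 with
  | nil => exact absurd rfl h
  | cons t1 ts' ih =>
    cases ts' with
    | nil =>
      simp [PySem.Chars.join_singleton, pvMidA]
    | cons t2 us =>
      have hd : (t0 :: t1 :: t2 :: us).dropLast = t0 :: (t1 :: t2 :: us).dropLast := by
        simp
      have hj : PySem.Chars.join ", ".toList (t0 :: (t1 :: t2 :: us).dropLast)
          = t0 ++ ", ".toList ++ PySem.Chars.join ", ".toList ((t1 :: t2 :: us).dropLast) := by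
        have h2 : (t1 :: t2 :: us).dropLast = t1 :: (t2 :: us).dropLast := by simp
        rw [h2, PySem.Chars.join_cons_cons]
      have hl : (t0 :: t1 :: t2 :: us).getLastD ([] : List Char)
          = (t1 :: t2 :: us).getLastD [] := by simp
      rw [hd, hj, hl]
      have hih := ih t1 (by simp)
      rw [pvMidA_cons _ _ (by simp)]
      calc t0 ++ ", ".toList ++ PySem.Chars.join ", ".toList ((t1 :: t2 :: us).dropLast)
            ++ ", и ".toList ++ (t1 :: t2 :: us).getLastD []
          = t0 ++ ", ".toList ++ (PySem.Chars.join ", ".toList ((t1 :: t2 :: us).dropLast)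
            ++ ", и ".toList ++ (t1 :: t2 :: us).getLastD []) := by simp [List.append_assoc]
        _ = t0 ++ ", ".toList ++ (t1 ++ pvMidA (t2 :: us)) := by rw [hih]
        _ = t0 ++ (", ".toList ++ t1 ++ pvMidA (t2 :: us)) := by simp [List.append_assoc]

lemma pvLow_eq : pvLowB = pvLowA := rfl

lemma pvStepA_first (data : List String) (d : String) (ds : List String)
    (hdata : data = d :: ds) :
    pvStepA data "Прямо сейчас он ".toList ((0 : Nat) : Int)
      = "Прямо сейчас он ".toList ++ pvLowA d.toList := by
  subst hdata
  have : (PySem.List.pyGetD (d :: ds) (0 : Int) "") = d := by simp [pysem]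
  simp [pvStepA, this]

lemma do_it_eq (data : List String) (hpre : ∀ s ∈ data, s ≠ "") :
    do_it data = do_it_alt data := by
  cases data with
  | nil => rfl
  | cons d ds =>
    have hd : d ≠ "" := hpre d (by simp)
    have hdl : d.toList ≠ [] := by
      intro e
      apply hd
      have := congrArg String.ofList e
      simpa using this
    simp only [do_it, do_it_alt, List.length_cons, List.isEmpty_cons, if_false,
      Bool.false_eq_true, pvLow_eq]
    rw [if_neg (by omega)]
    rw [show ((0 : Int)) = ((0 : Nat) : Int) by norm_num]
    rw [PySem.List.pyRange_one_cons (by push_cast; omega), List.foldl_cons]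
    rw [pvStepA_first (d :: ds) d ds rfl]
    cases ds with
    | nil =>
      rw [show ((0 : Nat) : Int) + 1 = ((1 : Nat) : Int) by norm_num,
        PySem.List.pyRange_one_eq_nil (by norm_num), List.foldl_nil]
      simp
    | cons e es =>
      have hacc : ("Прямо сейчас он ".toList).length
          < ("Прямо сейчас он ".toList ++ pvLowA d.toList).length := by
        have := pvLowA_length_pos d.toList hdl
        simp only [List.length_append]; omega
      rw [show ((0 : Nat) : Int) + 1 = ((1 : Nat) : Int) by norm_num]
      have hfold := pvFoldA (d :: e :: es) ((d :: e :: es).length - 1) 1 _ rfl (by simp) hacc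
      simp only [List.length_cons] at hfold
      simp only [List.length_cons]
      rw [hfold]
      rw [if_neg (by simp)]
      rw [show (d :: e :: es).map (fun s => pvLowA s.toList)
            = pvLowA d.toList :: (e :: es).map (fun s => pvLowA s.toList) from rfl]
      rw [pvJoinB (pvLowA d.toList) ((e :: es).map (fun s => pvLowA s.toList)) (by simp)]
      simp [List.append_assoc]

-- ===== VERDICT (by name: the statement is the Claim_ definition above) =====
theorem do_it_spec : Claim_equal_do_it := by
  intro data _ hpre
  exact do_it_eq data hpre
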